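-- pv_equiv track=rewrite | github.com/j-bennet/wharfee | dockercli/completer.py | in_quoted_string
-- ===== SOURCE A (Python) =====
-- def in_quoted_string(text):
--     """
--     Find last word in a sentence
--     :param text:
--     :return:
--     """
--     if text is not None:
--         text = text.strip()
--         if len(text) > 0 and ('"' in text or "'" in text):
--             stack = []
--             for char in text:
--                 if char in ['"', "'"]:
--                     if len(stack) > 0 and stack[-1] == char:
--                         stack = stack[:-1]
--                     else:
--                         stack.append(char)
--             return len(stack) > 0
--     return False
-- ===== SOURCE B (Python) =====
-- def in_quoted_string(text):
--     # One pass, O(1) state: map '"' to the reflection x -> -x and "'" to x -> 1-x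
--     # (generators of the infinite dihedral group); the quote word cancels to empty
--     # exactly when the composed affine map x -> s*x + t is the identity.
--     if text is None:
--         return False
--     s, t = 1, 0
--     for c in text:
--         if c == '"':
--             s, t = -s, -t
--         elif c == "'":
--             s, t = -s, 1 - t
--     return (s, t) != (1, 0)
-- ===== Notes on version B (the rewrite author's own statement) =====
-- stated objective: alternative
-- what changed: Replaces A's explicit stack of open quotes (list push/pop with slicing) by a single pass composing each quote's affine reflection (x -> -x for double quote, x -> 1-x for single quote) in the infinite dihedral group; the quote word cancels to empty exactly when the composed map s*x+t is the identity, so B keeps only two integers and needs no strip or membership pre-checks.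
import Mathlib
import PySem

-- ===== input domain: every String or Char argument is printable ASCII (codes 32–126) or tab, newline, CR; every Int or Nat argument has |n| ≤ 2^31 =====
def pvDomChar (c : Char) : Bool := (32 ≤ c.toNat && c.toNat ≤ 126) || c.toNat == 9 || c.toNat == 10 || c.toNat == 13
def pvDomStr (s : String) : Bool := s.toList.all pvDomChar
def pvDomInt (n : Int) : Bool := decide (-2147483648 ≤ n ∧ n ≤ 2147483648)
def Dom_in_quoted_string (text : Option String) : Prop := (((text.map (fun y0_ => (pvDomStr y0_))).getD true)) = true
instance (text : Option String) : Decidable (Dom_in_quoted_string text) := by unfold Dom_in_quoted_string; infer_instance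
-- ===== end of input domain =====

-- B replaces A's explicit quote stack with a one-pass O(1)-state fold that composes
-- affine reflections (infinite dihedral group); same return value, constant memory.


-- ===== PORT A =====
-- one loop step of A: on a quote, pop a matching top (stack[:-1]) or push (append)
def pvStepA (stack : List Char) (c : Char) : List Char :=
  if c = '"' ∨ c = '\'' then
    if 0 < stack.length ∧ PySem.List.pyGetD stack (-1) ' ' = c then
      PySem.List.slice stack none (some (-1))
    else stack ++ [c]
  else stack

def in_quoted_string (text : Option String) : Bool :=
  match text with
  | none => false
  | some t0 =>
    let t := PySem.Str.strip t0
    if 0 < PySem.Str.len t ∧ (PySem.Str.isIn "\"" t = true ∨ PySem.Str.isIn "'" t = true) then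
      decide (0 < (t.toList.foldl pvStepA []).length)
    else false

-- ===== PORT B =====
-- one loop step of B: compose the char's reflection with the running affine map x ↦ s·x + t
def pvStepB (p : Int × Int) (c : Char) : Int × Int :=
  if c = '"' then (-p.1, -p.2)
  else if c = '\'' then (-p.1, 1 - p.2)
  else p

def in_quoted_string_alt (text : Option String) : Bool :=
  match text with
  | none => false
  | some t => decide (t.toList.foldl pvStepB (1, 0) ≠ (1, 0))

-- ===== PRECONDITION & SPEC =====
def Spec_in_quoted_string (text : Option String) (out : Bool) : Prop := out = in_quoted_string_alt text
instance (text : Option String) (out : Bool) : Decidable (Spec_in_quoted_string text out) := by unfold Spec_in_quoted_string; infer_instance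

-- ===== CLAIM (what is proved, stated in full; the proofs are below) =====
def Claim_equal_in_quoted_string : Prop := ∀ (text : Option String), Dom_in_quoted_string text → Spec_in_quoted_string text (in_quoted_string text)

-- ===== LEMMAS AND PROOFS =====

-- the other quote character
def pvOther (c : Char) : Char := if c = '"' then '\'' else '"'

-- alternating quote word of length n ending with c
def pvAltEnd (c : Char) : Nat → List Char
  | 0 => []
  | n + 1 => pvAltEnd (pvOther c) n ++ [c]

-- the alternating word whose dihedral map is p (for p.1 = ±1): A's stack in closed form
def pvBuild (p : Int × Int) : List Char :=
  if p.1 = 1 ∧ p.2 = 0 then []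
  else if 1 ≤ p.2 then pvAltEnd '\'' (2 * p.2 - (if p.1 = 1 then 0 else 1)).toNat
  else pvAltEnd '"' (-2 * p.2 + (if p.1 = 1 then 0 else 1)).toNat

theorem pvAltEnd_length (c : Char) (n : Nat) : (pvAltEnd c n).length = n := by
  induction n generalizing c with
  | zero => rfl
  | succ n ih => simp [pvAltEnd, ih]

theorem pvBuild_pos (s t : Int) (ht : 1 ≤ t) :
    pvBuild (s, t) = pvAltEnd '\'' (2 * t - (if s = 1 then 0 else 1)).toNat := by
  unfold pvBuild
  rw [if_neg (by simp; omega), if_pos ht]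

theorem pvBuild_neg (s t : Int) (ht : t ≤ -1) :
    pvBuild (s, t) = pvAltEnd '"' (-2 * t + (if s = 1 then 0 else 1)).toNat := by
  unfold pvBuild
  rw [if_neg (by simp; omega), if_neg (by omega)]

theorem pvBuild_id : pvBuild (1, 0) = [] := rfl

theorem pvBuild_refl : pvBuild (-1, 0) = ['"'] := by decide

theorem pvStepA_push (c : Char) (hc : c = '"' ∨ c = '\'') (n : Nat) :
    pvStepA (pvAltEnd (pvOther c) n) c = pvAltEnd c (n + 1) := by
  cases n with
  | zero =>
      rcases hc with rfl | rfl <;> decide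
  | succ m =>
      show pvStepA (pvAltEnd (pvOther (pvOther c)) m ++ [pvOther c]) c = _
      unfold pvStepA
      rw [if_pos hc, if_neg]
      · rfl
      · rintro ⟨-, h⟩
        rw [PySem.List.pyGetD_neg_one_append_singleton] at h
        rcases hc with rfl | rfl <;> simp [pvOther] at h
      
theorem pvStepA_pop (c : Char) (hc : c = '"' ∨ c = '\'') (n : Nat) :
    pvStepA (pvAltEnd c (n + 1)) c = pvAltEnd (pvOther c) n := by
  show pvStepA (pvAltEnd (pvOther c) n ++ [c]) c = _
  unfold pvStepA
  rw [if_pos hc, if_pos ⟨by simp, by rw [PySem.List.pyGetD_neg_one_append_singleton]⟩,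
      PySem.List.slice_to_neg_one, List.dropLast_concat]

theorem pvStepA_push' (c : Char) (hc : c = '"' ∨ c = '\'') (d : Char) (hd : d = pvOther c)
    (n m : Nat) (h : m = n + 1) : pvStepA (pvAltEnd d n) c = pvAltEnd c m := by
  subst hd h; exact pvStepA_push c hc n

theorem pvStepA_pop' (c : Char) (hc : c = '"' ∨ c = '\'') (d : Char) (hd : d = pvOther c)
    (n m : Nat) (h : n = m + 1) : pvStepA (pvAltEnd c n) c = pvAltEnd d m := by
  subst hd h; exact pvStepA_pop c hc m

theorem pvStepA_build (p : Int × Int) (hs : p.1 = 1 ∨ p.1 = -1) (c : Char) :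
    pvStepA (pvBuild p) c = pvBuild (pvStepB p c) := by
  obtain ⟨s, t⟩ := p
  dsimp only at hs
  by_cases hq : c = '"' ∨ c = '\''
  · rcases hs with rfl | rfl <;> rcases hq with rfl | rfl
    · rw [show pvStepB (1, t) '"' = (-1, -t) from by simp [pvStepB]]
      rcases lt_trichotomy t 0 with ht | rfl | ht
      · rw [pvBuild_neg 1 t (by omega), pvBuild_pos (-1) (-t) (by omega)]
        exact pvStepA_pop' '"' (Or.inl rfl) '\'' (by decide) _ _ (by simp; omega)
      · decide
      · rw [pvBuild_pos 1 t (by omega), pvBuild_neg (-1) (-t) (by omega)]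
        exact pvStepA_push' '"' (Or.inl rfl) '\'' (by decide) _ _ (by simp; omega)
    · rw [show pvStepB (1, t) '\'' = (-1, 1 - t) from by simp [pvStepB]]
      rcases lt_trichotomy t 0 with ht | rfl | ht
      · rw [pvBuild_neg 1 t (by omega), pvBuild_pos (-1) (1 - t) (by omega)]
        exact pvStepA_push' '\'' (Or.inr rfl) '"' (by decide) _ _ (by simp; omega)
      · decide
      · by_cases h1 : t = 1
        · subst h1; decide
        · rw [pvBuild_pos 1 t (by omega), pvBuild_neg (-1) (1 - t) (by omega)]
          exact pvStepA_pop' '\'' (Or.inr rfl) '"' (by decide) _ _ (by simp; omega)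
    · rw [show pvStepB (-1, t) '"' = (1, -t) from by simp [pvStepB]]
      rcases lt_trichotomy t 0 with ht | rfl | ht
      · rw [pvBuild_neg (-1) t (by omega), pvBuild_pos 1 (-t) (by omega)]
        exact pvStepA_pop' '"' (Or.inl rfl) '\'' (by decide) _ _ (by simp; omega)
      · decide
      · rw [pvBuild_pos (-1) t (by omega), pvBuild_neg 1 (-t) (by omega)]
        exact pvStepA_push' '"' (Or.inl rfl) '\'' (by decide) _ _ (by simp; omega)
    · rw [show pvStepB (-1, t) '\'' = (1, 1 - t) from by simp [pvStepB]]
      rcases lt_trichotomy t 0 with ht | rfl | ht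
      · rw [pvBuild_neg (-1) t (by omega), pvBuild_pos 1 (1 - t) (by omega)]
        exact pvStepA_push' '\'' (Or.inr rfl) '"' (by decide) _ _ (by simp; omega)
      · decide
      · by_cases h1 : t = 1
        · subst h1; decide
        · rw [pvBuild_pos (-1) t (by omega), pvBuild_neg 1 (1 - t) (by omega)]
          exact pvStepA_pop' '\'' (Or.inr rfl) '"' (by decide) _ _ (by simp; omega)
  · push_neg at hq
    simp [pvStepA, pvStepB, hq.1, hq.2]

theorem pvStepB_sign (p : Int × Int) (hs : p.1 = 1 ∨ p.1 = -1) (c : Char) :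
    (pvStepB p c).1 = 1 ∨ (pvStepB p c).1 = -1 := by
  unfold pvStepB; split_ifs <;> rcases hs with h | h <;> simp [h]

theorem pvFold_build (l : List Char) (p : Int × Int) (hs : p.1 = 1 ∨ p.1 = -1) :
    l.foldl pvStepA (pvBuild p) = pvBuild (l.foldl pvStepB p) := by
  induction l generalizing p with
  | nil => rfl
  | cons c l ih =>
      simp only [List.foldl_cons, pvStepA_build p hs c]
      exact ih _ (pvStepB_sign p hs c)

theorem pvFoldB_sign (l : List Char) (p : Int × Int) (hs : p.1 = 1 ∨ p.1 = -1) :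
    (l.foldl pvStepB p).1 = 1 ∨ (l.foldl pvStepB p).1 = -1 := by
  induction l generalizing p with
  | nil => exact hs
  | cons c l ih => exact ih _ (pvStepB_sign p hs c)

theorem pvBuild_eq_nil (p : Int × Int) (hs : p.1 = 1 ∨ p.1 = -1) :
    pvBuild p = [] ↔ p = (1, 0) := by
  obtain ⟨s, t⟩ := p
  constructor
  · intro he
    rcases lt_trichotomy t 0 with ht | ht | ht
    · rw [pvBuild_neg s t (by omega)] at he
      have := pvAltEnd_length '"' (-2 * t + (if s = 1 then 0 else 1)).toNat
      rw [he] at this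
      simp at hs ⊢
      rcases hs with h | h <;> simp [h] at this <;> omega
    · subst ht
      rcases hs with h | h <;> simp at h <;> subst h
      · rfl
      · rw [pvBuild_refl] at he; cases he
    · rw [pvBuild_pos s t (by omega)] at he
      have := pvAltEnd_length '\'' (2 * t - (if s = 1 then 0 else 1)).toNat
      rw [he] at this
      simp at hs ⊢
      rcases hs with h | h <;> simp [h] at this <;> omega
  · intro he; rw [he]; rfl

-- non-quote chars are inert for pvStepB
theorem pvFoldB_inert (w : List Char) (p : Int × Int)
    (h : ∀ c ∈ w, c ≠ '"' ∧ c ≠ '\'') : w.foldl pvStepB p = p := by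
  induction w generalizing p with
  | nil => rfl
  | cons c w ih =>
      have hc := h c (by simp)
      rw [List.foldl_cons, show pvStepB p c = p by simp [pvStepB, hc.1, hc.2]]
      exact ih _ (fun c hc => h c (by simp [hc]))

theorem pvSpace_inert (c : Char) (h : PySem.Chars.isspace c = true) : c ≠ '"' ∧ c ≠ '\'' := by
  constructor <;> rintro rfl <;> exact absurd h (by decide)

-- stripping whitespace does not change the B-fold
theorem pvFoldB_strip (l : List Char) (p : Int × Int) :
    (PySem.Chars.strip l).foldl pvStepB p = l.foldl pvStepB p := by
  unfold PySem.Chars.strip PySem.Chars.lstrip PySem.Chars.rstrip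
  conv_rhs => rw [← List.takeWhile_append_dropWhile (p := PySem.Chars.isspace) (l := l)]
  rw [List.foldl_append,
      pvFoldB_inert _ _ (fun c hc => pvSpace_inert c (List.mem_takeWhile_imp hc))]
  set m := List.dropWhile PySem.Chars.isspace l with hm
  conv_rhs => rw [show m = (List.dropWhile PySem.Chars.isspace m.reverse).reverse ++
      (List.takeWhile PySem.Chars.isspace m.reverse).reverse by
    rw [← List.reverse_append, List.takeWhile_append_dropWhile, List.reverse_reverse]]
  rw [List.foldl_append,
      pvFoldB_inert _ _ (fun c hc => pvSpace_inert c
        (List.mem_takeWhile_imp (List.mem_reverse.mp hc)))]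

-- ===== VERDICT (by name: the statement is the Claim_ definition above) =====
theorem in_quoted_string_spec : Claim_equal_in_quoted_string := by
  intro text _
  unfold Spec_in_quoted_string
  cases text with
  | none => rfl
  | some t0 =>
      show in_quoted_string (some t0) = in_quoted_string_alt (some t0)
      unfold in_quoted_string in_quoted_string_alt
      simp only
      rw [← pvFoldB_strip t0.toList (1, 0), ← PySem.Str.toList_strip]
      set l := (PySem.Str.strip t0).toList with hl
      split_ifs with h
      · have h1 : l.foldl pvStepA [] = pvBuild (l.foldl pvStepB (1, 0)) := by
          rw [← pvBuild_id]; exact pvFold_build l (1, 0) (Or.inl rfl)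
        have h2 := pvBuild_eq_nil _ (pvFoldB_sign l (1, 0) (Or.inl rfl))
        rw [h1]
        by_cases h3 : l.foldl pvStepB (1, 0) = (1, 0)
        · rw [h3]; simp [pvBuild_id]
        · simp only [List.length_pos_iff]
          simp [(not_iff_not.mpr h2).mpr h3, h3]
      · push_neg at h
        by_cases hnil : l = []
        · simp [hnil]
        · have hpos : 0 < PySem.Str.len (PySem.Str.strip t0) := by
            unfold PySem.Str.len
            rw [← hl]
            exact_mod_cast List.length_pos_iff.mpr hnil
          obtain ⟨hq1, hq2⟩ := h hpos
          have m1 : '"' ∉ l := by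
            intro hmem
            apply hq1
            rw [PySem.Str.isIn_iff_infix, show ("\"" : String).toList = ['"'] from rfl, ← hl]
            exact (List.singleton_infix_iff _ _).mpr hmem
          have m2 : '\'' ∉ l := by
            intro hmem
            apply hq2
            rw [PySem.Str.isIn_iff_infix, show ("'" : String).toList = ['\''] from rfl, ← hl]
            exact (List.singleton_infix_iff _ _).mpr hmem
          rw [pvFoldB_inert l _ (fun c hc => ⟨fun e => m1 (e ▸ hc), fun e => m2 (e ▸ hc)⟩)]
          simp
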